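-- pv_equiv track=rewrite | github.com/hdowens/AoC2024 | day12/day12.py | get_region_and_area_discount
-- ===== SOURCE A (Python) =====
-- directions = {
--     "UP": (-1, 0),
--     "DOWN": (1, 0),
--     "RIGHT": (0, 1),
--     "LEFT": (0, -1),
-- }
--
-- def get_region_and_area_discount(region: set[tuple[int, int]]) -> int:
--     area = len(region)
--     sides = 0
--
--     for x, y in region:
--         corners = 0
--         neighbors = [
--             (x + dx, y + dy)
--             for dx, dy in directions.values()
--             if (x + dx, y + dy) in region
--         ]
--
--         if len(neighbors) == 0:
--             corners += 4
--         elif len(neighbors) == 1: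
--             corners += 2
--         elif len(neighbors) == 2:
--             if all(n[0] == x for n in neighbors) or all(n[1] == y for n in neighbors):
--                 continue
--             else:
--                 if (neighbors[0][0], neighbors[1][1]) in region:
--                     corners += 1
--                 else:
--                     corners += 2
--         elif len(neighbors) == 3:
--             if all(n[0] == x for n in neighbors) or all(n[1] == y for n in neighbors):
--                 continue
--             if (
--                 sum(n[0] == x for n in neighbors) == 2
--                 and sum(n[1] == y for n in neighbors) == 1
--             ):
--                 outlier = [n for n in neighbors if n[1] == y][0]
--                 to_check = [(outlier[0], n[1]) for n in neighbors if n[1] != y]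
--                 for n in to_check:
--                     if n not in region:
--                         corners += 1
--             if (
--                 sum(n[0] == x for n in neighbors) == 1
--                 and sum(n[1] == y for n in neighbors) == 2
--             ):
--                 outlier = [n for n in neighbors if n[0] == x][0]
--                 to_check = [(n[0], outlier[1]) for n in neighbors if n[0] != x]
--                 for n in to_check:
--                     if n not in region:
--                         corners += 1
--         elif len(neighbors) == 4:
--             diagonals = [(1, 1), (-1, -1), (1, -1), (-1, 1)]
--             for dx, dy in diagonals:
--                 if (x + dx, y + dy) not in region:
--                     corners += 1
--
--         sides += corners
--
--     return area * sides
-- ===== SOURCE B (Python) =====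
-- def get_region_and_area_discount(region):
--     sides = 0
--     for x, y in region:
--         for dx, dy in ((-1, -1), (-1, 1), (1, -1), (1, 1)):
--             a = (x + dx, y) in region
--             b = (x, y + dy) in region
--             if (not a and not b) or (a and b and (x + dx, y + dy) not in region):
--                 sides += 1
--     return len(region) * sides
-- ===== Notes on version B (the rewrite author's own statement) =====
-- stated objective: simpler
-- what changed: Replaces A's five-way case analysis on the number of orthogonal neighbours (with outlier hunting and per-case diagonal checks) by the uniform corner rule: for each of the four diagonal directions count a convex corner (both orthogonal neighbours absent) or a concave corner (both present and the diagonal cell absent).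
import Mathlib
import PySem

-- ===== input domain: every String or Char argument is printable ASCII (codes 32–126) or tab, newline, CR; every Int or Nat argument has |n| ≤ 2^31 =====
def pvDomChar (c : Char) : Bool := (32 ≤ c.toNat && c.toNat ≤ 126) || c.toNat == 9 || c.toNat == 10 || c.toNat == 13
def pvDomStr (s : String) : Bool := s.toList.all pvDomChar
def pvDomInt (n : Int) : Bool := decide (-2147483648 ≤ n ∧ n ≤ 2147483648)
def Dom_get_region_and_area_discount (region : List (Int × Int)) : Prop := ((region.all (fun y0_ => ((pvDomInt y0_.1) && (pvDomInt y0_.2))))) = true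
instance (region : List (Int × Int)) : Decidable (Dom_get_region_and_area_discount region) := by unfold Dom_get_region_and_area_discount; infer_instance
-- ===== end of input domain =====

-- B replaces A's per-cell neighbour-count case analysis (5 branches, outlier hunting)
-- by the uniform convex/concave corner rule over the four diagonal directions (objective: simpler).

-- ===== PORT A =====
-- directions.values() in dict order: UP, DOWN, RIGHT, LEFT
def pvDirections : List (Int × Int) := [(-1, 0), (1, 0), (0, 1), (0, -1)]

-- corners computed for one cell (x, y) of the loop body of A
def pvCornersA (region : List (Int × Int)) (x y : Int) : Int :=
  let neighbors := pvDirections.filterMap (fun d =>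
    if region.contains (x + d.1, y + d.2) then some (x + d.1, y + d.2) else none)
  if neighbors.length = 0 then 4
  else if neighbors.length = 1 then 2
  else if neighbors.length = 2 then
    if (neighbors.all fun n => n.1 == x) || (neighbors.all fun n => n.2 == y) then 0
    else match neighbors with
      | n0 :: n1 :: _ => if region.contains (n0.1, n1.2) then 1 else 2
      | _ => 0  -- unreachable: length = 2
  else if neighbors.length = 3 then
    if (neighbors.all fun n => n.1 == x) || (neighbors.all fun n => n.2 == y) then 0
    else
      (if (neighbors.countP fun n => n.1 == x) = 2 ∧ (neighbors.countP fun n => n.2 == y) = 1 then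
        let outlier := (neighbors.filter fun n => n.2 == y).headD (0, 0)
        let to_check := (neighbors.filter fun n => n.2 != y).map (fun n => (outlier.1, n.2))
        ((to_check.countP fun n => !region.contains n : Nat) : Int)
      else 0)
      +
      (if (neighbors.countP fun n => n.1 == x) = 1 ∧ (neighbors.countP fun n => n.2 == y) = 2 then
        let outlier := (neighbors.filter fun n => n.1 == x).headD (0, 0)
        let to_check := (neighbors.filter fun n => n.1 != x).map (fun n => (n.1, outlier.2))
        ((to_check.countP fun n => !region.contains n : Nat) : Int)
      else 0)
  else if neighbors.length = 4 then
    (([((1 : Int), (1 : Int)), (-1, -1), (1, -1), (-1, 1)].countP fun d =>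
        !region.contains (x + d.1, y + d.2) : Nat) : Int)
  else 0

def get_region_and_area_discount (region : List (Int × Int)) : Int :=
  let area : Int := region.length
  let sides : Int := region.foldl (fun s p => s + pvCornersA region p.1 p.2) 0
  area * sides

-- ===== PORT B =====
def pvCornerDirs : List (Int × Int) := [(-1, -1), (-1, 1), (1, -1), (1, 1)]

-- corners of one cell (x, y): convex (both orthogonal neighbours absent) or
-- concave (both present, diagonal absent), for each of the four diagonal directions
def pvCornersB (region : List (Int × Int)) (x y : Int) : Int :=
  ((pvCornerDirs.countP fun d =>
      let a := region.contains (x + d.1, y)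
      let b := region.contains (x, y + d.2)
      (!a && !b) || (a && b && !region.contains (x + d.1, y + d.2)) : Nat) : Int)

def get_region_and_area_discount_alt (region : List (Int × Int)) : Int :=
  (region.length : Int) * region.foldl (fun s p => s + pvCornersB region p.1 p.2) 0

-- ===== PRECONDITION & SPEC =====
def Spec_get_region_and_area_discount (region : List (Int × Int)) (out : Int) : Prop := out = get_region_and_area_discount_alt region
instance (region : List (Int × Int)) (out : Int) : Decidable (Spec_get_region_and_area_discount region out) := by unfold Spec_get_region_and_area_discount; infer_instance

-- ===== CLAIM (what is proved, stated in full; the proofs are below) =====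
def Claim_equal_get_region_and_area_discount : Prop := ∀ (region : List (Int × Int)), Dom_get_region_and_area_discount region → Spec_get_region_and_area_discount region (get_region_and_area_discount region)

-- ===== LEMMAS AND PROOFS =====
theorem pvBeq_add_neg_one_left (x : Int) : (x + -1 == x) = false := by
  rw [beq_eq_false_iff_ne]; omega

theorem pvBeq_add_one_left (x : Int) : (x + 1 == x) = false := by
  rw [beq_eq_false_iff_ne]; omega

set_option maxHeartbeats 1000000 in
theorem pvCorners_eq (region : List (Int × Int)) (x y : Int) :
    pvCornersA region x y = pvCornersB region x y := by
  by_cases hu : (x + -1, y) ∈ region <;>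
  by_cases hd : (x + 1, y) ∈ region <;>
  by_cases hr : (x, y + 1) ∈ region <;>
  by_cases hl : (x, y + -1) ∈ region <;>
  by_cases d1 : (x + -1, y + -1) ∈ region <;>
  by_cases d2 : (x + -1, y + 1) ∈ region <;>
  by_cases d3 : (x + 1, y + -1) ∈ region <;>
  by_cases d4 : (x + 1, y + 1) ∈ region <;>
    simp [pvCornersA, pvCornersB, pvDirections, pvCornerDirs, hu, hd, hr, hl, d1, d2, d3, d4,
      pvBeq_add_neg_one_left, pvBeq_add_one_left]

-- ===== VERDICT (by name: the statement is the Claim_ definition above) =====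
theorem get_region_and_area_discount_spec : Claim_equal_get_region_and_area_discount := by
  intro region _
  unfold Spec_get_region_and_area_discount get_region_and_area_discount get_region_and_area_discount_alt
  have h : (fun (s : Int) (p : Int × Int) => s + pvCornersA region p.1 p.2)
         = (fun (s : Int) (p : Int × Int) => s + pvCornersB region p.1 p.2) := by
    funext s p; rw [pvCorners_eq]
  simp only [h]
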